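-- pv_equiv track=rewrite | github.com/m-almagro-cadiz/spanish-clinical-preprocessing | utils_module.py | generateParentsByMatchingCharacters
-- ===== SOURCE A (Python) =====
-- def generateParentsByMatchingCharacters(y):
--    path = dict()
--    for codes in y:
--       for code in codes:
--          if code not in path:
--             path[code] = list()
--             for l in range(1, len(code)):
--                if code[-l - 1] != '.':
--                   path[code].append(code[0:-l])
--             for l in range(len(path[code])):
--                if path[code][l] not in path:
--                   path[path[code][l]] = path[code][l+1::]
--    return path
-- ===== SOURCE B (Python) =====
-- def _longestValidPrefix(s):
--     for i in range(len(s) - 1, 0, -1):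
--         if s[i - 1] != '.':
--             return s[:i]
--     return None
--
--
-- def generateParentsByMatchingCharacters(y):
--     path = {}
--     for codes in y:
--         for code in codes:
--             if code in path:
--                 continue
--             # walk the longest-valid-prefix chain until a known key (or no prefix),
--             # reserving each key's position in the dict
--             chain = []
--             s = code
--             while s is not None and s not in path:
--                 path[s] = []
--                 chain.append(s)
--                 s = _longestValidPrefix(s)
--             tail = [] if s is None else [s] + path[s]
--             # fill in ancestor lists bottom-up, sharing tails
--             for k in reversed(chain):
--                 path[k] = tail
--                 tail = [k] + tail
--     return path
-- ===== Notes on version B (the rewrite author's own statement) =====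
-- stated objective: alternative
-- what changed: Instead of A's build-the-full-prefix-list-then-slice-assign passes per code, B walks the longest-valid-prefix chain of each unseen code until a memoized key, then fills the ancestor lists bottom-up by consing onto a shared tail, reusing already-computed ancestor lists.
import Mathlib
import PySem

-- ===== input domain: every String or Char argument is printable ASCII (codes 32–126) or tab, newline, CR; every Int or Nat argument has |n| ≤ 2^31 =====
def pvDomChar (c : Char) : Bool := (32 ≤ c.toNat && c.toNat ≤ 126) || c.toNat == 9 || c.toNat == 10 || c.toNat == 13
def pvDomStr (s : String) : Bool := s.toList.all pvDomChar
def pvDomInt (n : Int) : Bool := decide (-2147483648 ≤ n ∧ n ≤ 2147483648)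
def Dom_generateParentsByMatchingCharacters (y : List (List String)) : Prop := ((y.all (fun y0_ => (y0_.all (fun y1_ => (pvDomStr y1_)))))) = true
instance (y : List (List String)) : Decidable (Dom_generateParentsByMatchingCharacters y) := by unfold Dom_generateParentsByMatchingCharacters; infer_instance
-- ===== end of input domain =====

-- B replaces A's build-all-prefixes-then-slice-assign passes by a single walk down the
-- longest-valid-prefix chain with memoized ancestor tails shared across codes (alternative decomposition).

-- ===== PORT A =====
def generateParentsByMatchingCharacters (y : List (List String)) : List (String × List String) :=
  (y.foldl (fun path codes =>
    codes.foldl (fun path code =>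
      if path.contains code then path
      else
        let path1 := path.insert code ([] : List String)
        let path2 := (PySem.List.pyRange 1 (PySem.Str.len code) 1).foldl
          (fun p l =>
            if PySem.Str.pyGet? code (-l - 1) ≠ some '.' then
              p.modify code [] (fun v => v ++ [PySem.Str.slice code none (some (-l))])
            else p) path1
        (PySem.List.pyRange 0 ((path2.getD code []).length : Int) 1).foldl
          (fun p l =>
            let q := PySem.List.pyGetD (p.getD code []) l ""
            if p.contains q then p
            else p.insert q (PySem.List.slice (p.getD code []) (some (l + 1)) none)) path2)
      path) (PySem.Dict.empty : PySem.Dict String (List String))).items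

-- ===== PORT B =====
def pvLongestValidPrefix (s : String) : Option String :=
  ((PySem.List.pyRange (PySem.Str.len s - 1) 0 (-1)).find?
    (fun i => PySem.Str.pyGet? s (i - 1) != some '.')).map
    (fun i => PySem.Str.slice s none (some i))

-- the 'while s is not None and s not in path' loop; fuel only makes it total (call sites pass enough)
def pvWalkChain (fuel : Nat) (path : PySem.Dict String (List String))
    (chain : List String) (s? : Option String) :
    PySem.Dict String (List String) × List String × Option String :=
  match fuel, s? with
  | _, none => (path, chain, none)
  | 0, some s => (path, chain, some s)
  | fuel+1, some s =>
    if path.contains s then (path, chain, some s)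
    else pvWalkChain fuel (path.insert s []) (chain ++ [s]) (pvLongestValidPrefix s)

def generateParentsByMatchingCharacters_alt (y : List (List String)) : List (String × List String) :=
  (y.foldl (fun path codes =>
    codes.foldl (fun path code =>
      if path.contains code then path
      else
        let r := pvWalkChain (code.toList.length + 1) path [] (some code)
        let tail : List String := match r.2.2 with
          | none => []
          | some s => s :: r.1.getD s []
        (r.2.1.reverse.foldl
          (fun (pr : PySem.Dict String (List String) × List String) k =>
            (pr.1.insert k pr.2, k :: pr.2)) (r.1, tail)).1)
      path) (PySem.Dict.empty : PySem.Dict String (List String))).items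

-- ===== PRECONDITION & SPEC =====
def Spec_generateParentsByMatchingCharacters (y : List (List String)) (out : List (String × List String)) : Prop := out = generateParentsByMatchingCharacters_alt y
instance (y : List (List String)) (out : List (String × List String)) : Decidable (Spec_generateParentsByMatchingCharacters y out) := by unfold Spec_generateParentsByMatchingCharacters; infer_instance

-- ===== CLAIM (what is proved, stated in full; the proofs are below) =====
def Claim_equal_generateParentsByMatchingCharacters : Prop := ∀ (y : List (List String)), Dom_generateParentsByMatchingCharacters y → Spec_generateParentsByMatchingCharacters y (generateParentsByMatchingCharacters y)

-- ===== LEMMAS AND PROOFS =====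

-- valid prefixes of a code, longest first: prefix of length k+1 is kept iff its last char ≠ '.'
def pvVpk (cs : List Char) : Nat → List String
  | 0 => []
  | k+1 => if cs[k]? = some '.' then pvVpk cs k else String.ofList (cs.take (k+1)) :: pvVpk cs k

def pvVp (s : String) : List String := pvVpk s.toList (s.toList.length - 1)

def pvStepF (d : PySem.Dict String (List String)) (q : String) : PySem.Dict String (List String) :=
  if d.contains q then d else d.insert q (pvVp q)

def pvFold (d : PySem.Dict String (List String)) (xs : List String) : PySem.Dict String (List String) :=
  xs.foldl pvStepF d

-- the canonical per-code step both programs implement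
def pvStep (d : PySem.Dict String (List String)) (c : String) : PySem.Dict String (List String) :=
  if d.contains c then d else pvFold (d.insert c (pvVp c)) (pvVp c)

def pvRun (y : List (List String)) : PySem.Dict String (List String) :=
  y.foldl (fun d codes => codes.foldl pvStep d) PySem.Dict.empty

-- dict invariant: every key holds its valid-prefix list, and keys are closed under valid prefixes
def pvGB (d : PySem.Dict String (List String)) : Prop :=
  ∀ k, d.contains k = true → d.getD k [] = pvVp k ∧ ∀ q ∈ pvVp k, d.contains q = true

-- bounded form: the invariant restricted to keys shorter than n (placeholders above n are allowed)
def pvGBb (d : PySem.Dict String (List String)) (n : Nat) : Prop :=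
  ∀ k, d.contains k = true → k.toList.length < n →
    d.getD k [] = pvVp k ∧ ∀ q ∈ pvVp k, d.contains q = true

def pvTailOf (d : PySem.Dict String (List String)) (s? : Option String) : List String :=
  match s? with
  | none => []
  | some t => t :: d.getD t []

def pvFin (d : PySem.Dict String (List String)) (ch : List String) (tail : List String) :
    PySem.Dict String (List String) × List String :=
  ch.reverse.foldl (fun pr k => (pr.1.insert k pr.2, k :: pr.2)) (d, tail)

-- ---- facts about pvVpk / pvVp ----

theorem pvVpk_take (cs : List Char) (k m : Nat) (h : k ≤ m) : pvVpk (cs.take m) k = pvVpk cs k := by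
  induction k with
  | zero => rfl
  | succ k ih =>
    simp only [pvVpk]
    rw [List.getElem?_take_of_lt (by omega), List.take_take, min_eq_left (by omega), ih (by omega)]

theorem pvVpk_mem (cs : List Char) (k : Nat) (q : String) (hq : q ∈ pvVpk cs k) :
    ∃ j, j < k ∧ cs[j]? ≠ some '.' ∧ q = String.ofList (cs.take (j+1)) := by
  induction k with
  | zero => simp [pvVpk] at hq
  | succ k ih =>
    simp only [pvVpk] at hq
    split at hq
    · obtain ⟨j, hj, h1, h2⟩ := ih hq; exact ⟨j, by omega, h1, h2⟩
    · rcases List.mem_cons.mp hq with h | h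
      · exact ⟨k, by omega, by assumption, h⟩
      · obtain ⟨j, hj, h1, h2⟩ := ih h; exact ⟨j, by omega, h1, h2⟩

theorem pvVp_length_lt (s q : String) (hq : q ∈ pvVp s) : q.toList.length < s.toList.length := by
  obtain ⟨j, hj, -, h2⟩ := pvVpk_mem _ _ _ hq
  subst h2
  simp only [String.toList_ofList, List.length_take]
  omega

theorem pvVp_ne (s q : String) (hq : q ∈ pvVp s) : q ≠ s := by
  intro h; subst h; exact absurd (pvVp_length_lt q q hq) (by omega)

theorem pvVpk_cons (cs : List Char) (k : Nat) (p : String) (rest : List String)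
    (h : pvVpk cs k = p :: rest) :
    ∃ j, j < k ∧ cs[j]? ≠ some '.' ∧ p = String.ofList (cs.take (j+1)) ∧ rest = pvVpk cs j := by
  induction k with
  | zero => simp [pvVpk] at h
  | succ k ih =>
    simp only [pvVpk] at h
    split at h
    · obtain ⟨j, hj, h1, h2, h3⟩ := ih h; exact ⟨j, by omega, h1, h2, h3⟩
    · injection h with h1 h2
      exact ⟨k, by omega, by assumption, h1.symm, h2.symm⟩

theorem pvVp_head_tail (s p : String) (rest : List String) (h : pvVp s = p :: rest) :
    rest = pvVp p := by
  obtain ⟨j, hj, h1, h2, h3⟩ := pvVpk_cons _ _ _ _ h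
  have hlen : p.toList.length = j + 1 := by
    subst h2; simp only [String.toList_ofList, List.length_take]; omega
  have : pvVp p = pvVpk s.toList j := by
    unfold pvVp
    rw [hlen]
    have : p.toList = s.toList.take (j+1) := by subst h2; simp
    rw [this]
    exact pvVpk_take _ _ _ (by omega)
  rw [this, h3]

theorem pvVp_drop (l : Nat) : ∀ (s : String), l < (pvVp s).length →
    (pvVp s).drop (l+1) = pvVp ((pvVp s).getD l "") := by
  induction l with
  | zero =>
    intro s h
    cases hvp : pvVp s with
    | nil => rw [hvp] at h; simp at h
    | cons p rest =>
      simp [pvVp_head_tail s p rest hvp]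
  | succ l ih =>
    intro s h
    cases hvp : pvVp s with
    | nil => rw [hvp] at h; simp at h
    | cons p rest =>
      have hrest : rest = pvVp p := pvVp_head_tail s p rest hvp
      rw [hvp] at h
      simp only [List.drop_succ_cons, List.getD_cons_succ, hrest]
      exact ih p (by rw [← hrest]; simpa using h)

theorem pvVp_subset (s q r : String) (hq : q ∈ pvVp s) (hr : r ∈ pvVp q) : r ∈ pvVp s := by
  obtain ⟨l, hl, hget⟩ := List.getElem_of_mem hq
  have : (pvVp s).getD l "" = q := by rw [List.getD_eq_getElem _ _ hl, hget]
  have hdrop := pvVp_drop l s hl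
  rw [this] at hdrop
  exact List.mem_of_mem_drop (hdrop ▸ hr)

-- ---- the longest-valid-prefix scan is the head of pvVp ----

theorem pvLvp_aux (s : String) (m : Nat) (hm : m ≤ s.toList.length) :
    ((PySem.List.pyRange (m : Int) 0 (-1)).find?
      (fun i => PySem.Str.pyGet? s (i - 1) != some '.')).map
      (fun i => PySem.Str.slice s none (some i)) = (pvVpk s.toList m).head? := by
  induction m with
  | zero =>
    rw [PySem.List.pyRange_neg_one_eq_nil (by norm_num)]
    rfl
  | succ m ih =>
    rw [PySem.List.pyRange_neg_one_cons (by positivity)]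
    rw [show ((m+1 : Nat) : Int) - 1 = ((m : Nat) : Int) by push_cast; ring]
    have hidx : PySem.Str.pyGet? s (((m+1 : Nat) : Int) - 1) = s.toList[m]? := by
      have : ((m+1 : Nat) : Int) - 1 = ((m : Nat) : Int) := by push_cast; ring
      rw [this, PySem.Str.pyGet?_natCast]
    by_cases hdot : s.toList[m]? = some '.'
    · rw [List.find?_cons_of_neg (by simp [hdot])]
      simp only [pvVpk, if_pos hdot]
      exact ih (by omega)
    · rw [List.find?_cons_of_pos (by simp [hdot])]
      simp only [pvVpk, if_neg hdot, Option.map_some, List.head?_cons]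
      congr 1
      show PySem.Str.slice s none (some ((m+1 : Nat) : Int)) = _
      unfold PySem.Str.slice
      rw [show PySem.Chars.slice s.toList none (some ((m+1:Nat):Int)) =
        PySem.List.slice s.toList none (some ((m+1:Nat):Int)) from rfl]
      rw [PySem.List.slice_to _ (by positivity)]
      norm_num

theorem pvLvp_eq_head? (s : String) : pvLongestValidPrefix s = (pvVp s).head? := by
  unfold pvLongestValidPrefix pvVp
  cases h : s.toList.length with
  | zero =>
    rw [show PySem.Str.len s - 1 = -1 by rw [PySem.Str.len_eq, h]; rfl]
    rw [PySem.List.pyRange_neg_one_eq_nil (by norm_num)]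
    rfl
  | succ n =>
    rw [show PySem.Str.len s - 1 = ((n : Nat) : Int) by rw [PySem.Str.len_eq, h]; push_cast; ring]
    rw [Nat.add_sub_cancel]
    exact pvLvp_aux s n (by omega)

-- ---- dict fold lemmas ----

theorem pvFold_cons (d : PySem.Dict String (List String)) (x : String) (xs : List String) :
    pvFold d (x :: xs) = pvFold (pvStepF d x) xs := rfl

theorem pvStepF_contains_mono (d : PySem.Dict String (List String)) (q k : String)
    (h : d.contains k = true) : (pvStepF d q).contains k = true := by
  unfold pvStepF; split
  · exact h
  · simp [PySem.Dict.contains_insert, h]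

theorem pvFold_contains_mono (xs : List String) : ∀ (d : PySem.Dict String (List String)) (k : String),
    d.contains k = true → (pvFold d xs).contains k = true := by
  induction xs with
  | nil => intro d k h; exact h
  | cons x xs ih => intro d k h; exact ih _ _ (pvStepF_contains_mono d x k h)

theorem pvFold_contains_of_mem (xs : List String) : ∀ (d : PySem.Dict String (List String)) (q : String),
    q ∈ xs → (pvFold d xs).contains q = true := by
  induction xs with
  | nil => intro d q h; simp at h
  | cons x xs ih =>
    intro d q h
    rcases List.mem_cons.mp h with h | h
    · subst h
      have : (pvStepF d q).contains q = true := by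
        unfold pvStepF; split
        · assumption
        · simp
      exact pvFold_contains_mono xs _ _ this
    · exact ih _ _ h

theorem pvFold_contains_src (xs : List String) : ∀ (d : PySem.Dict String (List String)) (k : String),
    (pvFold d xs).contains k = true → d.contains k = true ∨ k ∈ xs := by
  induction xs with
  | nil => intro d k h; exact Or.inl h
  | cons x xs ih =>
    intro d k h
    rcases ih _ _ h with h' | h'
    · unfold pvStepF at h'
      split at h'
      · exact Or.inl h'
      · rw [PySem.Dict.contains_insert] at h'
        rcases Bool.or_eq_true_iff.mp h' with h'' | h''
        · exact Or.inr (by simp_all)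
        · exact Or.inl h''
    · exact Or.inr (List.mem_cons_of_mem _ h')


theorem pvFold_values (xs : List String) : ∀ (d : PySem.Dict String (List String)),
    (∀ k, d.contains k = true → d.getD k [] = pvVp k) →
    ∀ k, (pvFold d xs).contains k = true → (pvFold d xs).getD k [] = pvVp k := by
  induction xs with
  | nil => intro d h k hk; exact h k hk
  | cons x xs ih =>
    intro d h k hk
    refine ih _ ?_ k hk
    intro k' hk'
    by_cases hc : d.contains x = true
    · rw [show pvStepF d x = d from by unfold pvStepF; rw [if_pos hc]] at hk' ⊢
      exact h k' hk'
    · rw [show pvStepF d x = d.insert x (pvVp x) from by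
        unfold pvStepF; rw [if_neg hc]] at hk' ⊢
      by_cases hkx : k' = x
      · subst hkx; rw [PySem.Dict.getD_insert_self]
      · rw [PySem.Dict.getD_insert_of_ne d _ _ hkx]
        rw [PySem.Dict.contains_insert] at hk'
        refine h k' ?_
        rcases Bool.or_eq_true_iff.mp hk' with h'' | h''
        · exact absurd (by simpa using h'') hkx
        · exact h''

theorem pvFold_id_of_contains (xs : List String) : ∀ (d : PySem.Dict String (List String)),
    (∀ q ∈ xs, d.contains q = true) → pvFold d xs = d := by
  induction xs with
  | nil => intro d _; rfl
  | cons x xs ih =>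
    intro d h
    rw [pvFold_cons]
    have hx : pvStepF d x = d := by unfold pvStepF; rw [h x (by simp)]; simp
    rw [hx]
    exact ih d (fun q hq => h q (List.mem_cons_of_mem _ hq))

theorem pvIns_comm (d : PySem.Dict String (List String)) (s q : String) (v w : List String)
    (hs : d.contains s = true) (hne : s ≠ q) :
    (d.insert q w).insert s v = (d.insert s v).insert q w := by
  apply PySem.Dict.ext
  by_cases hq : d.contains q = true
  · rw [PySem.Dict.items_insert_of_contains _ _ (by rw [PySem.Dict.contains_insert, hs]; simp),
      PySem.Dict.items_insert_of_contains _ _ hq,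
      PySem.Dict.items_insert_of_contains _ _ (by rw [PySem.Dict.contains_insert, hq]; simp),
      PySem.Dict.items_insert_of_contains _ _ hs]
    simp only [List.map_map]
    apply List.map_congr_left
    intro p _
    by_cases h1 : p.1 = q <;> by_cases h2 : p.1 = s <;> simp_all
  · have hq' : d.contains q = false := by simpa using hq
    have hqs' : ¬ q = s := fun h => hne (Eq.symm h)
    have hqs : (q == s) = false := by simp [hqs']
    rw [PySem.Dict.items_insert_of_contains _ _ (by rw [PySem.Dict.contains_insert, hs]; simp),
      PySem.Dict.items_insert_of_not_contains _ _ hq',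
      PySem.Dict.items_insert_of_not_contains _ _ (by rw [PySem.Dict.contains_insert, hq', hqs]; rfl),
      PySem.Dict.items_insert_of_contains _ _ hs]
    simp only [List.map_append]
    congr 1
    simp [hqs']

theorem pvFold_insert_comm (xs : List String) : ∀ (d : PySem.Dict String (List String)) (s : String)
    (v : List String), d.contains s = true → s ∉ xs →
    (pvFold d xs).insert s v = pvFold (d.insert s v) xs := by
  induction xs with
  | nil => intro d s v _ _; rfl
  | cons x xs ih =>
    intro d s v hs hx
    have hsx : s ≠ x := by rintro rfl; exact hx (by simp)
    rw [pvFold_cons, pvFold_cons]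
    have hstep : pvStepF (d.insert s v) x = (pvStepF d x).insert s v := by
      unfold pvStepF
      rw [PySem.Dict.contains_insert]
      have : (x == s) = false := by simp [hsx.symm]
      rw [this, Bool.false_or]
      split
      · rfl
      · exact (pvIns_comm d s x v (pvVp x) hs hsx).symm
    rw [hstep, ← ih _ _ _ (pvStepF_contains_mono d x s hs) (fun h => hx (List.mem_cons_of_mem _ h))]

-- ---- A's per-code body equals pvStep ----

theorem pvLoop1_gen (code : String) (m : Nat) (hm : m < code.toList.length) :
    ∀ (d : PySem.Dict String (List String)) (acc : List String),
      (PySem.List.pyRange ((code.toList.length : Int) - m) (code.toList.length : Int) 1).foldl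
        (fun p l =>
          if PySem.Str.pyGet? code (-l - 1) ≠ some '.' then
            p.modify code [] (fun v => v ++ [PySem.Str.slice code none (some (-l))])
          else p) (d.insert code acc)
      = d.insert code (acc ++ pvVpk code.toList m) := by
  set cs := code.toList with hcs
  set L := cs.length with hL
  induction m with
  | zero =>
    intro d acc
    rw [show (L:Int) - (0:Nat) = (L:Int) by push_cast; ring]
    rw [PySem.List.pyRange_one_eq_nil (le_refl _)]
    simp [pvVpk]
  | succ m ih =>
    intro d acc
    rw [PySem.List.pyRange_one_cons (by push_cast; omega)]
    rw [show (L:Int) - ((m+1:Nat):Int) + 1 = (L:Int) - (m:Nat) by push_cast; ring]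
    simp only [List.foldl_cons]
    have hget : PySem.Str.pyGet? code (-((L:Int) - ((m+1:Nat):Int)) - 1) = cs[m]? := by
      show PySem.List.pyGet? cs _ = _
      simp only [PySem.List.pyGet?, PySem.List.pyIdx?]
      rw [if_neg (by push_cast; omega), if_pos (by push_cast; omega)]
      have : (L - (-(-((L:Int) - ((m+1:Nat):Int)) - 1)).toNat) = m := by
        have h1 : (-(-((L:Int) - ((m+1:Nat):Int)) - 1)) = (L:Int) - m := by push_cast; ring
        rw [h1]
        omega
      rw [this]
      rfl
    have hslice : PySem.Str.slice code none (some (-((L:Int) - ((m+1:Nat):Int)))) =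
        String.ofList (cs.take (m+1)) := by
      unfold PySem.Str.slice
      congr 1
      show PySem.List.slice cs none (some _) = _
      have hk : -((L:Int) - ((m+1:Nat):Int)) = -(((L - (m+1) : Nat)) : Int) := by push_cast; omega
      rw [hk, PySem.List.slice_to_neg_natCast cs (L - (m+1)) (by omega)]
      congr 1
      omega
    by_cases hdot : cs[m]? = some '.'
    · rw [if_neg (by rw [hget, hdot]; simp)]
      rw [ih (by omega) d acc]
      simp only [pvVpk, if_pos hdot]
    · rw [if_pos (by rw [hget]; exact hdot)]
      have hmod : (d.insert code acc).modify code []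
          (fun v => v ++ [PySem.Str.slice code none (some (-((L:Int) - ((m+1:Nat):Int))))]) =
          d.insert code (acc ++ [String.ofList (cs.take (m+1))]) := by
        simp only [PySem.Dict.modify, PySem.Dict.getD_insert_self, PySem.Dict.insert_insert_self, hslice]
      rw [hmod, ih (by omega) d (acc ++ [String.ofList (cs.take (m+1))])]
      simp only [pvVpk, if_neg hdot]
      rw [List.append_assoc]
      rfl

theorem pvLoop2_gen (code : String) (t : Nat) (ht : t ≤ (pvVp code).length) :
    ∀ (d : PySem.Dict String (List String)), d.getD code [] = pvVp code →
      (PySem.List.pyRange (((pvVp code).length - t : Nat) : Int) ((pvVp code).length : Int) 1).foldl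
        (fun p l =>
          let q := PySem.List.pyGetD (p.getD code []) l ""
          if p.contains q then p
          else p.insert q (PySem.List.slice (p.getD code []) (some (l + 1)) none)) d
      = pvFold d ((pvVp code).drop ((pvVp code).length - t)) := by
  set vs := pvVp code with hvs
  set n := vs.length with hn
  induction t with
  | zero =>
    intro d _
    rw [show ((n - 0 : Nat) : Int) = (n : Int) by norm_num]
    rw [PySem.List.pyRange_one_eq_nil (le_refl _)]
    rw [Nat.sub_zero, List.drop_length]
    rfl
  | succ t ih =>
    intro d hd
    have hj : n - (t+1) < n := by omega
    rw [PySem.List.pyRange_one_cons (by exact_mod_cast hj)]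
    simp only [List.foldl_cons]
    set j := n - (t+1) with hjdef
    have hq : PySem.List.pyGetD (d.getD code []) ((j : Nat) : Int) "" = vs.getD j "" := by
      rw [hd, PySem.List.pyGetD_natCast]
    have hqmem : vs.getD j "" ∈ vs := by
      rw [List.getD_eq_getElem _ _ hj]
      exact List.getElem_mem _
    have hqne : vs.getD j "" ≠ code := pvVp_ne code _ hqmem
    have hslice : PySem.List.slice (d.getD code []) (some (((j : Nat) : Int) + 1)) none
        = pvVp (vs.getD j "") := by
      rw [hd, show ((j : Nat) : Int) + 1 = (((j + 1 : Nat)) : Int) by push_cast; ring,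
        PySem.List.slice_from _ (by positivity)]
      rw [show ((j + 1 : Nat) : Int).toNat = j + 1 by omega]
      exact pvVp_drop j code hj
    have hbody : (let q := PySem.List.pyGetD (d.getD code []) ((j : Nat) : Int) ""
        if d.contains q then d
        else d.insert q (PySem.List.slice (d.getD code []) (some (((j : Nat) : Int) + 1)) none))
        = pvStepF d (vs.getD j "") := by
      simp only [hq, hslice]
      rfl
    rw [hbody]
    have hd' : (pvStepF d (vs.getD j "")).getD code [] = vs := by
      unfold pvStepF
      split
      · exact hd
      · rw [PySem.Dict.getD_insert_of_ne _ _ _ (fun h => hqne h.symm)]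
        exact hd
    have harg : ((j : Nat) : Int) + 1 = (((n - t : Nat)) : Int) := by omega
    rw [harg]
    rw [ih (by omega) (pvStepF d (vs.getD j "")) hd']
    have hdrop : vs.drop j = vs.getD j "" :: vs.drop (n - t) := by
      rw [List.getD_eq_getElem _ _ hj, show n - t = j + 1 by omega]
      exact List.drop_eq_getElem_cons hj
    rw [hdrop]
    rfl

theorem pvAstep_eq (d : PySem.Dict String (List String)) (code : String) :
    (if d.contains code then d
     else
       let path1 := d.insert code ([] : List String)
       let path2 := (PySem.List.pyRange 1 (PySem.Str.len code) 1).foldl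
         (fun p l =>
           if PySem.Str.pyGet? code (-l - 1) ≠ some '.' then
             p.modify code [] (fun v => v ++ [PySem.Str.slice code none (some (-l))])
           else p) path1
       (PySem.List.pyRange 0 ((path2.getD code []).length : Int) 1).foldl
         (fun p l =>
           let q := PySem.List.pyGetD (p.getD code []) l ""
           if p.contains q then p
           else p.insert q (PySem.List.slice (p.getD code []) (some (l + 1)) none)) path2)
    = pvStep d code := by
  unfold pvStep
  by_cases hc : d.contains code = true
  · rw [if_pos hc, if_pos hc]
  · rw [if_neg hc, if_neg hc]
    dsimp only
    have hpath2 : (PySem.List.pyRange 1 (PySem.Str.len code) 1).foldl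
        (fun p l =>
          if PySem.Str.pyGet? code (-l - 1) ≠ some '.' then
            p.modify code [] (fun v => v ++ [PySem.Str.slice code none (some (-l))])
          else p) (d.insert code ([] : List String))
        = d.insert code (pvVp code) := by
      rw [PySem.Str.len_eq]
      by_cases hL0 : code.toList.length = 0
      · rw [hL0]
        rw [PySem.List.pyRange_one_eq_nil (by norm_num)]
        unfold pvVp
        rw [hL0]
        rfl
      · have hr : PySem.List.pyRange 1 ((code.toList.length : Nat) : Int) 1
            = PySem.List.pyRange ((code.toList.length : Int) - ((code.toList.length - 1 : Nat) : Int))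
                (code.toList.length : Int) 1 := by
          congr 1
          omega
        rw [hr, pvLoop1_gen code (code.toList.length - 1) (by omega) d []]
        unfold pvVp
        rw [List.nil_append]
    rw [hpath2, PySem.Dict.getD_insert_self]
    have h0 : (0 : Int) = (((pvVp code).length - (pvVp code).length : Nat) : Int) := by
      simp
    rw [h0, pvLoop2_gen code (pvVp code).length (le_refl _) _ (PySem.Dict.getD_insert_self d code (pvVp code) [])]
    rw [Nat.sub_self, List.drop_zero]

-- ---- B's per-code body equals pvStep ----

theorem pvWalk_append (fuel : Nat) : ∀ (d : PySem.Dict String (List String)) (a b : List String)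
    (s? : Option String),
    pvWalkChain fuel d (a ++ b) s? =
      ((pvWalkChain fuel d b s?).1, a ++ (pvWalkChain fuel d b s?).2.1,
        (pvWalkChain fuel d b s?).2.2) := by
  induction fuel with
  | zero => intro d a b s?; cases s? <;> rfl
  | succ fuel ih =>
    intro d a b s?
    cases s? with
    | none => rfl
    | some s =>
      simp only [pvWalkChain]
      by_cases hc : d.contains s = true
      · simp [hc]
      · simp only [hc, Bool.false_eq_true, if_false]
        rw [List.append_assoc]
        exact ih _ a (b ++ [s]) _

theorem pvWalk_fin_spec (fuel : Nat) :
    ∀ (s : String) (d : PySem.Dict String (List String)),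
      s.toList.length < fuel → pvGBb d (s.toList.length + 1) → d.contains s = false →
      pvFin (pvWalkChain fuel d [] (some s)).1 (pvWalkChain fuel d [] (some s)).2.1
          (pvTailOf (pvWalkChain fuel d [] (some s)).1 (pvWalkChain fuel d [] (some s)).2.2)
        = (pvFold (d.insert s (pvVp s)) (pvVp s), s :: pvVp s) := by
  induction fuel with
  | zero => intro s d hfuel _ _; omega
  | succ fuel ih =>
    intro s d hfuel hgb hc
    have hstep : pvWalkChain (fuel+1) d [] (some s)
        = pvWalkChain fuel (d.insert s []) ([s] ++ []) (pvLongestValidPrefix s) := by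
      simp only [pvWalkChain, hc, Bool.false_eq_true, if_false]
      rfl
    rw [hstep, pvWalk_append fuel (d.insert s []) [s] [] (pvLongestValidPrefix s)]
    have hfin : ∀ (D : PySem.Dict String (List String)) (c tail : List String),
        pvFin D ([s] ++ c) tail = ((pvFin D c tail).1.insert s (pvFin D c tail).2,
          s :: (pvFin D c tail).2) := by
      intro D c tail
      unfold pvFin
      rw [List.reverse_append, List.foldl_append]
      rfl
    cases hlvp : pvLongestValidPrefix s with
    | none =>
      have hvp : pvVp s = [] := by
        have := pvLvp_eq_head? s
        rw [hlvp] at this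
        exact List.head?_eq_none_iff.mp this.symm
      have hW : pvWalkChain fuel (d.insert s []) [] (none : Option String)
          = (d.insert s [], [], none) := by cases fuel <;> rfl
      simp only [hW, hfin]
      unfold pvFin pvTailOf
      simp only [List.reverse_nil, List.foldl_nil]
      rw [hvp, PySem.Dict.insert_insert_self]
      rfl
    | some p =>
      have hvp : pvVp s = p :: pvVp p := by
        have h1 := pvLvp_eq_head? s
        rw [hlvp] at h1
        obtain ⟨rest, hrest⟩ := List.head?_eq_some_iff.mp h1.symm
        rw [hrest, pvVp_head_tail s p rest hrest]
      have hpmem : p ∈ pvVp s := by rw [hvp]; simp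
      have hplen : p.toList.length < s.toList.length := pvVp_length_lt s p hpmem
      have hpne : p ≠ s := pvVp_ne s p hpmem
      have hslen1 : 1 ≤ s.toList.length := by omega
      obtain ⟨f', rfl⟩ : ∃ f', fuel = f' + 1 := ⟨fuel - 1, by omega⟩
      by_cases hcp : d.contains p = true
      · have hcp1 : (d.insert s ([] : List String)).contains p = true := by
          rw [PySem.Dict.contains_insert]
          rw [hcp]
          simp
        have hW : pvWalkChain (f'+1) (d.insert s []) [] (some p)
            = (d.insert s [], [], some p) := by
          simp only [pvWalkChain, hcp1, if_true]
        simp only [hW, hfin]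
        unfold pvFin pvTailOf
        simp only [List.reverse_nil, List.foldl_nil]
        have hgdp : (d.insert s ([] : List String)).getD p [] = pvVp p := by
          rw [PySem.Dict.getD_insert_of_ne _ _ _ hpne]
          exact (hgb p hcp (by omega)).1
        rw [hgdp, PySem.Dict.insert_insert_self, ← hvp]
        have hid : pvFold (d.insert s (pvVp s)) (pvVp s) = d.insert s (pvVp s) := by
          apply pvFold_id_of_contains
          intro q hq
          rw [PySem.Dict.contains_insert]
          rw [hvp] at hq
          rcases List.mem_cons.mp hq with h | h
          · subst h; rw [hcp]; simp
          · rw [(hgb p hcp (by omega)).2 q h]; simp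
        rw [hid]
      · have hcp1 : (d.insert s ([] : List String)).contains p = false := by
          rw [PySem.Dict.contains_insert]
          simp [hcp, hpne]
        have hgb1 : pvGBb (d.insert s []) (p.toList.length + 1) := by
          intro k hk hklen
          have hkns : k ≠ s := by
            intro h; subst h; omega
          rw [PySem.Dict.contains_insert] at hk
          have hkd : d.contains k = true := by
            rcases Bool.or_eq_true_iff.mp hk with h | h
            · exact absurd (by simpa using h) hkns
            · exact h
          obtain ⟨hv, hcl⟩ := hgb k hkd (by omega)
          refine ⟨?_, ?_⟩
          · rw [PySem.Dict.getD_insert_of_ne _ _ _ hkns]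
            exact hv
          · intro q hq
            rw [PySem.Dict.contains_insert, hcl q hq]
            simp
        have := ih p (d.insert s []) (by omega) hgb1 hcp1
        simp only [hfin, this]
        have hsnotvp : s ∉ pvVp p := by
          intro h
          have := pvVp_length_lt p s h
          omega
        have hsin : ((d.insert s ([] : List String)).insert p (pvVp p)).contains s = true := by
          rw [PySem.Dict.contains_insert]
          have : (s == s) = true := by simp
          rw [PySem.Dict.contains_insert, this]
          simp
        rw [pvFold_insert_comm (pvVp p) _ s (p :: pvVp p) hsin hsnotvp]
        rw [pvIns_comm (d.insert s []) s p (p :: pvVp p) (pvVp p)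
          (by rw [PySem.Dict.contains_insert]; simp) (fun h => hpne h.symm)]
        rw [PySem.Dict.insert_insert_self, hvp, pvFold_cons]
        have hstepf : pvStepF (d.insert s (p :: pvVp p)) p
            = (d.insert s (p :: pvVp p)).insert p (pvVp p) := by
          unfold pvStepF
          rw [if_neg (by
            rw [PySem.Dict.contains_insert]
            simp [hcp, fun h : p = s => hpne h])]
        rw [hstepf]

theorem pvBstep_eq (d : PySem.Dict String (List String)) (code : String) (hgb : pvGB d) :
    (if d.contains code then d
     else
       let r := pvWalkChain (code.toList.length + 1) d [] (some code)
       let tail : List String := match r.2.2 with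
         | none => []
         | some s => s :: r.1.getD s []
       (r.2.1.reverse.foldl
         (fun (pr : PySem.Dict String (List String) × List String) k =>
           (pr.1.insert k pr.2, k :: pr.2)) (r.1, tail)).1)
    = pvStep d code := by
  unfold pvStep
  by_cases hc : d.contains code = true
  · rw [if_pos hc, if_pos hc]
  · rw [if_neg hc, if_neg hc]
    have hspec := pvWalk_fin_spec (code.toList.length + 1) code d (by omega)
      (fun k hk _ => hgb k hk) (by simpa using hc)
    show (pvFin (pvWalkChain (code.toList.length + 1) d [] (some code)).1
        (pvWalkChain (code.toList.length + 1) d [] (some code)).2.1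
        (pvTailOf (pvWalkChain (code.toList.length + 1) d [] (some code)).1
          (pvWalkChain (code.toList.length + 1) d [] (some code)).2.2)).1
      = pvFold (d.insert code (pvVp code)) (pvVp code)
    rw [hspec]

-- ---- the invariant is preserved ----

theorem pvStep_GB (d : PySem.Dict String (List String)) (c : String) (hgb : pvGB d) :
    pvGB (pvStep d c) := by
  unfold pvStep
  by_cases hc : d.contains c = true
  · rw [if_pos hc]; exact hgb
  · rw [if_neg hc]
    intro k hk
    constructor
    · refine pvFold_values (pvVp c) _ ?_ k hk
      intro k' hk'
      rw [PySem.Dict.contains_insert] at hk'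
      by_cases hkc : k' = c
      · subst hkc; rw [PySem.Dict.getD_insert_self]
      · rw [PySem.Dict.getD_insert_of_ne _ _ _ hkc]
        exact (hgb k' (by rcases Bool.or_eq_true_iff.mp hk' with h | h
                          · exact absurd (by simpa using h) hkc
                          · exact h)).1
    · intro q hq
      rcases pvFold_contains_src (pvVp c) _ k hk with hsrc | hsrc
      · rw [PySem.Dict.contains_insert] at hsrc
        rcases Bool.or_eq_true_iff.mp hsrc with h | h
        · have hkc : k = c := by simpa using h
          subst hkc
          exact pvFold_contains_of_mem _ _ _ hq
        · have := (hgb k h).2 q hq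
          exact pvFold_contains_mono _ _ _ (by rw [PySem.Dict.contains_insert, this]; simp)
      · exact pvFold_contains_of_mem _ _ _ (pvVp_subset c k q hsrc hq)

theorem pvGB_empty : pvGB (PySem.Dict.empty : PySem.Dict String (List String)) := by
  intro k h
  rw [PySem.Dict.contains_empty] at h
  exact absurd h (by simp)

-- ---- top level ----

theorem pvA_eq (y : List (List String)) :
    generateParentsByMatchingCharacters y = (pvRun y).items := by
  unfold generateParentsByMatchingCharacters pvRun
  congr 2
  funext path codes
  congr 1
  funext p code
  exact pvAstep_eq p code

theorem pvInner_GB (codes : List String) : ∀ (d : PySem.Dict String (List String)),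
    pvGB d → pvGB (codes.foldl pvStep d) := by
  induction codes with
  | nil => intro d h; exact h
  | cons c cs ih => intro d h; exact ih _ (pvStep_GB d c h)

theorem pvBinner_eq (codes : List String) : ∀ (d : PySem.Dict String (List String)), pvGB d →
    codes.foldl (fun path code =>
      if path.contains code then path
      else
        let r := pvWalkChain (code.toList.length + 1) path [] (some code)
        let tail : List String := match r.2.2 with
          | none => []
          | some s => s :: r.1.getD s []
        (r.2.1.reverse.foldl
          (fun (pr : PySem.Dict String (List String) × List String) k =>
            (pr.1.insert k pr.2, k :: pr.2)) (r.1, tail)).1) d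
    = codes.foldl pvStep d := by
  induction codes with
  | nil => intro d _; rfl
  | cons c cs ih =>
    intro d h
    simp only [List.foldl_cons]
    rw [pvBstep_eq d c h]
    exact ih _ (pvStep_GB d c h)

theorem pvB_eq (y : List (List String)) :
    generateParentsByMatchingCharacters_alt y = (pvRun y).items := by
  unfold generateParentsByMatchingCharacters_alt pvRun
  congr 1
  have main : ∀ (ys : List (List String)) (d : PySem.Dict String (List String)), pvGB d →
      ys.foldl (fun path codes =>
        codes.foldl (fun path code =>
          if path.contains code then path
          else
            let r := pvWalkChain (code.toList.length + 1) path [] (some code)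
            let tail : List String := match r.2.2 with
              | none => []
              | some s => s :: r.1.getD s []
            (r.2.1.reverse.foldl
              (fun (pr : PySem.Dict String (List String) × List String) k =>
                (pr.1.insert k pr.2, k :: pr.2)) (r.1, tail)).1) path) d
      = ys.foldl (fun d codes => codes.foldl pvStep d) d := by
    intro ys
    induction ys with
    | nil => intro d _; rfl
    | cons codes rest ih =>
      intro d h
      simp only [List.foldl_cons]
      rw [pvBinner_eq codes d h]
      exact ih _ (pvInner_GB codes d h)
  exact main y PySem.Dict.empty pvGB_empty

-- ===== VERDICT (by name: the statement is the Claim_ definition above) =====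
theorem generateParentsByMatchingCharacters_spec : Claim_equal_generateParentsByMatchingCharacters := by
  intro y _
  show _ = _
  rw [pvA_eq, pvB_eq]
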